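-- pv_equiv track=rewrite | github.com/mhxtxs/HCAI---Group-8 | HCAI---Group-8-main-4/app.py | _next_dataset_id
-- ===== SOURCE A (Python) =====
-- def _next_dataset_id(dataset):
--     ids = []
--     for p in dataset:
--         try:
--             ids.append(int(p.get("id")))
--         except:
--             pass
--     return (max(ids) if ids else 0) + 1
-- ===== SOURCE B (Python) =====
-- def _best(dataset, lo, hi):
--     """Max of the parseable ids in dataset[lo:hi], None if there are none (divide and conquer)."""
--     if lo >= hi:
--         return None
--     if hi - lo == 1:
--         try:
--             return int(dataset[lo].get("id"))
--         except:
--             return None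
--     mid = (lo + hi) // 2
--     l = _best(dataset, lo, mid)
--     r = _best(dataset, mid, hi)
--     if l is None:
--         return r
--     if r is None:
--         return l
--     return l if l >= r else r
--
--
-- def _next_dataset_id(dataset):
--     m = _best(dataset, 0, len(dataset))
--     return (0 if m is None else m) + 1
-- ===== Notes on version B (the rewrite author's own statement) =====
-- stated objective: alternative
-- what changed: B computes the maximum parsed id by divide and conquer (split the list in half, recurse on each half, combine the two optional maxima) instead of A's linear pass that collects all ids into a list and calls max.
import Mathlib
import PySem

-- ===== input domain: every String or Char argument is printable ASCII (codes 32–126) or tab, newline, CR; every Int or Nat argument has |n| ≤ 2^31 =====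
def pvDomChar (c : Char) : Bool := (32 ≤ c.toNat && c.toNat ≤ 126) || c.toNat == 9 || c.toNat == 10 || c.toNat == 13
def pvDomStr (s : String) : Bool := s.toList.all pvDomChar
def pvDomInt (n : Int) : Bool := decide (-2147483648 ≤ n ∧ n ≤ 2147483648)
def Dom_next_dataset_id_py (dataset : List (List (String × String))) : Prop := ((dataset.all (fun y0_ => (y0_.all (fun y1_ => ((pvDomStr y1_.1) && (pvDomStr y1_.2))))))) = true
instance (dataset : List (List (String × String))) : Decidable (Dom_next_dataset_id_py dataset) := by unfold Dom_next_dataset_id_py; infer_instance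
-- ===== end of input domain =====

-- B computes the maximum parsed id by divide and conquer on index ranges instead of
-- A's linear pass that collects the ids into a list and calls max (objective: alternative).

-- ===== PORT A =====
-- int(p.get("id")): get returns Option; int(None) is a TypeError, int(bad str) a ValueError — both caught: skip
def next_dataset_id_py (dataset : List (List (String × String))) : Int :=
  let ids : List Int := dataset.foldl (fun ids p =>
    match ((PySem.Dict.mk p).get? "id").bind PySem.Int.ofStr? with
    | some v => ids ++ [v]
    | none => ids) []
  (match PySem.List.max? ids (fun x => x) with | some m => m | none => 0) + 1

-- ===== PORT B =====
-- _best(dataset, lo, hi): lo/hi are always in 0..len(dataset), so Nat indices and Nat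
-- division '(lo+hi)/2' are exact for Python's '//' here; dataset[lo] is in range.
def pvBest (ds : List (List (String × String))) (lo hi : Nat) : Option Int :=
  if lo ≥ hi then none
  else if hi - lo = 1 then
    match ds[lo]? with
    | some p => ((PySem.Dict.mk p).get? "id").bind PySem.Int.ofStr?
    | none => none
  else
    let mid := (lo + hi) / 2
    let l := pvBest ds lo mid
    let r := pvBest ds mid hi
    match l, r with
    | none, r => r
    | some a, none => some a
    | some a, some b => if a ≥ b then some a else some b
termination_by hi - lo
decreasing_by all_goals omega

def next_dataset_id_py_alt (dataset : List (List (String × String))) : Int :=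
  (match pvBest dataset 0 dataset.length with | some m => m | none => 0) + 1

-- ===== PRECONDITION & SPEC =====
def Spec_next_dataset_id_py (dataset : List (List (String × String))) (out : Int) : Prop := out = next_dataset_id_py_alt dataset
instance (dataset : List (List (String × String))) (out : Int) : Decidable (Spec_next_dataset_id_py dataset out) := by unfold Spec_next_dataset_id_py; infer_instance

-- ===== CLAIM =====
def Claim_equal_next_dataset_id_py : Prop := ∀ (dataset : List (List (String × String))), Dom_next_dataset_id_py dataset → Spec_next_dataset_id_py dataset (next_dataset_id_py dataset)

-- ===== LEMMAS AND PROOFS =====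

-- the parsed id of one record (shared by the reasoning about both ports)
def pvParse (p : List (String × String)) : Option Int :=
  ((PySem.Dict.mk p).get? "id").bind PySem.Int.ofStr?

-- optional max of a list of ids
def pvM (l : List Int) : Option Int :=
  match l with
  | [] => none
  | x :: t => some (t.foldl max x)

theorem a_fold_eq (dataset : List (List (String × String))) (acc : List Int) :
    dataset.foldl (fun ids p =>
      match ((PySem.Dict.mk p).get? "id").bind PySem.Int.ofStr? with
      | some v => ids ++ [v]
      | none => ids) acc = acc ++ dataset.filterMap pvParse := by
  induction dataset generalizing acc with
  | nil => simp
  | cons p t ih =>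
    simp only [List.foldl_cons, List.filterMap_cons]
    rw [show ((PySem.Dict.mk p).get? "id").bind PySem.Int.ofStr? = pvParse p from rfl]
    cases h : pvParse p <;> simp [ih]

theorem foldl_max_max (t : List Int) (x y : Int) :
    t.foldl max (max x y) = max x (t.foldl max y) := by
  induction t generalizing y with
  | nil => rfl
  | cons z t ih =>
    simp only [List.foldl_cons]
    rw [max_assoc, ih]

theorem pvM_append (l1 l2 : List Int) :
    pvM (l1 ++ l2) = (match pvM l1, pvM l2 with
      | none, r => r
      | some a, none => some a
      | some a, some b => some (max a b)) := by
  cases l1 with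
  | nil => cases l2 <;> rfl
  | cons x t1 =>
    cases l2 with
    | nil => simp [pvM]
    | cons y t2 =>
      simp only [pvM, List.cons_append, List.foldl_append, List.foldl_cons]
      rw [foldl_max_max]

-- pvBest on a range computes pvM of the parsed ids of that segment
theorem pvBest_eq (ds : List (List (String × String))) (lo hi : Nat)
    (hhi : hi ≤ ds.length) :
    pvBest ds lo hi = pvM (((ds.drop lo).take (hi - lo)).filterMap pvParse) := by
  by_cases h0 : lo ≥ hi
  · rw [pvBest]
    simp [h0, show hi - lo = 0 from by omega, pvM]
  · by_cases h1 : hi - lo = 1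
    · rw [pvBest]
      simp only [if_neg h0, h1]
      have hlt : lo < ds.length := by omega
      have htk : (ds.drop lo).take 1 = [ds[lo]] := by
        rw [List.drop_eq_getElem_cons hlt]; rfl
      rw [htk, List.getElem?_eq_getElem hlt]
      show pvParse ds[lo] = pvM (List.filterMap pvParse [ds[lo]])
      cases hp : pvParse ds[lo] <;> simp [List.filterMap, hp, pvM]
    · rw [pvBest]
      simp only [if_neg h0, if_neg h1]
      have hmid1 : lo < (lo + hi) / 2 := by omega
      have hmid2 : (lo + hi) / 2 < hi := by omega
      rw [pvBest_eq ds lo ((lo + hi) / 2) (by omega),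
          pvBest_eq ds ((lo + hi) / 2) hi hhi]
      have hsplit : (ds.drop lo).take (hi - lo)
          = (ds.drop lo).take ((lo + hi) / 2 - lo) ++ (ds.drop ((lo + hi) / 2)).take (hi - (lo + hi) / 2) := by
        have h2 : hi - lo = ((lo + hi) / 2 - lo) + (hi - (lo + hi) / 2) := by omega
        rw [h2, List.take_add, List.drop_drop,
            show lo + ((lo + hi) / 2 - lo) = (lo + hi) / 2 from by omega]
      rw [hsplit, List.filterMap_append, pvM_append]
      cases pvM (((ds.drop lo).take ((lo + hi) / 2 - lo)).filterMap pvParse) with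
      | none => cases pvM (((ds.drop ((lo + hi) / 2)).take (hi - (lo + hi) / 2)).filterMap pvParse) <;> rfl
      | some a =>
        cases pvM (((ds.drop ((lo + hi) / 2)).take (hi - (lo + hi) / 2)).filterMap pvParse) with
        | none => rfl
        | some b =>
          by_cases hab : a ≥ b
          · simp [hab]
          · simp [hab, max_eq_right (le_of_not_ge hab)]
termination_by hi - lo
decreasing_by all_goals omega

-- ===== VERDICT =====
theorem next_dataset_id_py_spec : Claim_equal_next_dataset_id_py := by
  intro dataset _
  show next_dataset_id_py dataset = next_dataset_id_py_alt dataset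
  simp only [next_dataset_id_py, next_dataset_id_py_alt]
  rw [a_fold_eq, List.nil_append,
      pvBest_eq dataset 0 dataset.length (le_refl _)]
  simp only [Nat.sub_zero, List.drop_zero, List.take_length]
  cases h : dataset.filterMap pvParse with
  | nil => simp [pvM, PySem.List.max?]
  | cons x t =>
    rw [PySem.List.max?_id_cons]
    simp [pvM]
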